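-- pv_equiv track=rewrite | github.com/zhenfelix/OnlineJudgeCodings | LeetCode/2212. Maximum Points in an Archery Competition/solution.py | maximumBobPoints
-- ===== SOURCE A (Python) =====
-- from typing import List
--
-- from functools import lru_cache
--
-- def maximumBobPoints(numArrows: int, aliceArrows: List[int]) -> List[int]:
--
--     @lru_cache(None)
--     def dfs(i, cnt):
--         if cnt < 0:
--             return -float('inf')
--         if i < 0:
--             return 0
--         return max(i+dfs(i-1,cnt-aliceArrows[i]-1), dfs(i-1,cnt))
--     n = len(aliceArrows)
--     dfs(n-1, numArrows)
--     bobArrows = [0]*n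
--     for i in range(n)[::-1]:
--         if i+dfs(i-1,numArrows-aliceArrows[i]-1) >= dfs(i-1, numArrows):
--             bobArrows[i] = aliceArrows[i]+1
--             numArrows -= bobArrows[i]
--     if numArrows > 0:
--         bobArrows[0] += numArrows
--     return bobArrows
-- ===== SOURCE B (Python) =====
-- from typing import List
--
-- from functools import lru_cache
--
-- def maximumBobPoints(numArrows: int, aliceArrows: List[int]) -> List[int]:
--     # One memoized recursion that returns the best value together with the
--     # bob-arrow plan for sections 0..i, instead of a value-only DP followed
--     # by a separate reconstruction pass over a mutable array.
--     NEG = float('-inf')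
--
--     @lru_cache(None)
--     def solve(i, cnt):
--         if i < 0:
--             return (0 if cnt >= 0 else NEG, ())
--         tv, tp = solve(i - 1, cnt - aliceArrows[i] - 1)
--         sv, sp = solve(i - 1, cnt)
--         take = i + tv
--         val = NEG if cnt < 0 else max(take, sv)
--         if take >= sv:
--             return (val, tp + (aliceArrows[i] + 1,))
--         return (val, sp + (0,))
--
--     bob = list(solve(len(aliceArrows) - 1, numArrows)[1])
--     left = numArrows - sum(bob)
--     if left > 0:
--         bob[0] += left
--     return bob
-- ===== Notes on version B (the rewrite author's own statement) =====
-- stated objective: alternative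
-- what changed: Replaces A's two-phase scheme (value-only memoized DP, then a separate backward reconstruction loop mutating a preallocated array) by a single memoized recursion that returns the optimal value together with the bob-arrow plan, building the answer list directly as the recursion returns.
import Mathlib
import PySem

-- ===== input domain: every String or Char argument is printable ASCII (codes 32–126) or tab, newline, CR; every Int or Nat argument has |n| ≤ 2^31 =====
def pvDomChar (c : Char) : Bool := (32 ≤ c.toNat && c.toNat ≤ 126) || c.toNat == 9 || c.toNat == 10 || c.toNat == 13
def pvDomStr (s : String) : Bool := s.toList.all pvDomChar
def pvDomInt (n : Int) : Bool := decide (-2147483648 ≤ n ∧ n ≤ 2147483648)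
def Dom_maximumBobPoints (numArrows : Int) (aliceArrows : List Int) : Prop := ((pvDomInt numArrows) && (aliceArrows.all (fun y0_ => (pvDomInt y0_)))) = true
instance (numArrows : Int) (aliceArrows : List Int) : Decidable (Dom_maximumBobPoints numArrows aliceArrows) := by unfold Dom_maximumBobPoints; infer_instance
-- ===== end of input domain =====

-- B replaces A's value-DP + backward array-mutating reconstruction by one recursion
-- returning (value, plan) and building the answer directly (objective: alternative).

-- Shared -infinity arithmetic: Option Int with none = float('-inf'); both Pythons
-- use the same float('-inf') arithmetic, ported exactly for this domain.
def pvAddNI (i : Int) (v : Option Int) : Option Int := v.map (fun x => i + x)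
def pvGeNI (x y : Option Int) : Bool :=
  match x, y with
  | none, none => true
  | none, some _ => false
  | some _, none => true
  | some a, some b => decide (b ≤ a)
def pvMaxNI (x y : Option Int) : Option Int := if pvGeNI x y then x else y

-- ===== PORT A =====
-- dfs(i, cnt) of A with fuel k = i+1 (the recursion decreases i by 1 down to -1);
-- lru_cache is a pure-speed memo and does not change dfs's value, so it is not modelled.
-- aliceArrows[i] is ported as pyGetD (exact here: every index used is in range).
def dfsA (a : List Int) : Nat → Int → Option Int
  | k, cnt =>
    if cnt < 0 then none
    else match k with
      | 0 => some 0
      | Nat.succ j =>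
        pvMaxNI (pvAddNI j (dfsA a j (cnt - PySem.List.pyGetD a j 0 - 1))) (dfsA a j cnt)

-- one iteration of A's reconstruction loop body (state = (bobArrows, numArrows))
def stepA (a : List Int) (st : List Int × Int) (i : Int) : List Int × Int :=
  let ai := PySem.List.pyGetD a i 0
  if pvGeNI (pvAddNI i (dfsA a i.toNat (st.2 - ai - 1))) (dfsA a i.toNat st.2) then
    (st.1.set i.toNat (ai + 1), st.2 - (ai + 1))
  else st

def maximumBobPoints (numArrows : Int) (aliceArrows : List Int) : List Int :=
  let n := aliceArrows.length
  -- the priming call dfs(n-1, numArrows) only fills the cache; it has no effect on the result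
  let res := ((PySem.List.pyRange 0 (n : Int) 1).reverse).foldl (stepA aliceArrows)
      (List.replicate n 0, numArrows)
  if res.2 > 0 then
    res.1.set 0 (PySem.List.pyGetD res.1 0 0 + res.2)
  else res.1

-- ===== PORT B =====
-- solve(i, cnt) of Source B with fuel k = i+1; returns (value, plan for sections 0..k-1)
def solveB (a : List Int) : Nat → Int → Option Int × List Int
  | 0, cnt => ((if cnt ≥ 0 then some 0 else none), [])
  | Nat.succ j, cnt =>
    let aj := PySem.List.pyGetD a j 0
    let t := solveB a j (cnt - aj - 1)
    let s := solveB a j cnt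
    let take := pvAddNI j t.1
    let val := if cnt < 0 then none else pvMaxNI take s.1
    if pvGeNI take s.1 then (val, t.2 ++ [aj + 1]) else (val, s.2 ++ [0])

def maximumBobPoints_alt (numArrows : Int) (aliceArrows : List Int) : List Int :=
  let bob := (solveB aliceArrows aliceArrows.length numArrows).2
  let left := numArrows - bob.sum
  if left > 0 then bob.set 0 (PySem.List.pyGetD bob 0 0 + left) else bob

-- ===== PRECONDITION & SPEC =====
-- Pre_ excludes exactly the inputs where both Pythons raise IndexError
-- (empty aliceArrows with arrows left over: bobArrows[0] += numArrows on an empty list).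
def Pre_maximumBobPoints (numArrows : Int) (aliceArrows : List Int) : Prop :=
  aliceArrows = [] → numArrows ≤ 0
instance (numArrows : Int) (aliceArrows : List Int) : Decidable (Pre_maximumBobPoints numArrows aliceArrows) := by unfold Pre_maximumBobPoints; infer_instance

def pvWitness_maximumBobPoints : Int × List Int := (6, [2, 1, 0])

def Spec_maximumBobPoints (numArrows : Int) (aliceArrows : List Int) (out : List Int) : Prop := out = maximumBobPoints_alt numArrows aliceArrows
instance (numArrows : Int) (aliceArrows : List Int) (out : List Int) : Decidable (Spec_maximumBobPoints numArrows aliceArrows out) := by unfold Spec_maximumBobPoints; infer_instance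

-- ===== CLAIM (what is proved, stated in full; the proofs are below) =====
def Claim_equal_maximumBobPoints : Prop := ∀ (numArrows : Int) (aliceArrows : List Int), Dom_maximumBobPoints numArrows aliceArrows → Pre_maximumBobPoints numArrows aliceArrows → Spec_maximumBobPoints numArrows aliceArrows (maximumBobPoints numArrows aliceArrows)

-- ===== LEMMAS AND PROOFS =====

-- the value component of B's combined recursion is A's dfs
theorem solveB_fst (a : List Int) : ∀ (k : Nat) (cnt : Int), (solveB a k cnt).1 = dfsA a k cnt := by
  intro k
  induction k with
  | zero =>
    intro cnt
    rcases lt_or_ge cnt 0 with h | h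
    · simp [solveB, dfsA, h, not_le.mpr h]
    · simp [solveB, dfsA, h, not_lt.mpr h]
  | succ j ih =>
    intro cnt
    rw [solveB, dfsA]
    by_cases h : cnt < 0 <;>
      simp only [h, if_true, if_false, ih] <;>
      split <;> simp

-- A's reconstruction loop over indices k-1 .. 0 rewrites the zero prefix of bob
-- into B's plan and subtracts the plan's total cost from the budget
theorem loopA_eq (a : List Int) : ∀ (k : Nat) (bob : List Int) (m : Int),
    k ≤ bob.length → bob.take k = List.replicate k 0 →
    ((PySem.List.pyRange 0 (k : Int) 1).reverse).foldl (stepA a) (bob, m)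
      = ((solveB a k m).2 ++ bob.drop k, m - (solveB a k m).2.sum) := by
  intro k
  induction k with
  | zero =>
    intro bob m _ _
    rw [show ((0 : Nat) : Int) = 0 by norm_num, PySem.List.pyRange_one_eq_nil le_rfl]
    simp [solveB]
  | succ j ih =>
    intro bob m hlen htake
    have hj : j < bob.length := by omega
    have hrange : (PySem.List.pyRange 0 ((j + 1 : Nat) : Int) 1)
        = PySem.List.pyRange 0 (j : Int) 1 ++ [(j : Int)] := by
      push_cast
      exact PySem.List.pyRange_one_succ_right (a := 0) (b := (j : Int)) (by positivity)
    rw [hrange, List.reverse_append, List.reverse_singleton, List.singleton_append,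
      List.foldl_cons]
    have hbj : bob[j] = 0 := by
      have : (bob.take (j+1))[j]? = (List.replicate (j+1) (0 : Int))[j]? := by rw [htake]
      simp [hj] at this
      have hbj' : bob[j]? = some 0 := by simpa [List.getElem?_eq_getElem hj] using this
      simpa [List.getElem?_eq_getElem hj] using hbj'
    -- unfold one step of the loop and of solveB
    rw [solveB]
    simp only [stepA, solveB_fst]
    have htoNat : ((j : Int)).toNat = j := by simp
    by_cases hcond : pvGeNI (pvAddNI (j : Int) (dfsA a j (m - PySem.List.pyGetD a (j : Int) 0 - 1))) (dfsA a j m) = true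
    · -- take branch
      simp only [htoNat, hcond, if_true]
      set aj := PySem.List.pyGetD a (j : Int) 0 with haj
      have htake' : (bob.set j (aj + 1)).take j = List.replicate j 0 := by
        rw [List.take_set_of_le (le_refl j)]
        have := congrArg (List.take j) htake
        simpa [List.take_take, List.take_replicate] using this
      have hres := ih (bob.set j (aj + 1)) (m - aj - 1) (by simpa using Nat.le_of_lt hj) htake'
      rw [show m - (aj + 1) = m - aj - 1 from by ring, hres]
      have hdrop : (bob.set j (aj + 1)).drop j = (aj + 1) :: bob.drop (j + 1) := by
        rw [List.drop_eq_getElem_cons (by simpa using hj)]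
        rw [List.getElem_set_self, List.drop_set_of_lt (by omega : j < j + 1)]
      rw [hdrop, Prod.mk.injEq]
      constructor
      · simp
      · simp [List.sum_append]
        ring
    · -- skip branch
      simp only [Bool.not_eq_true] at hcond
      simp only [htoNat, hcond, if_false, Bool.false_eq_true]
      have hres := ih bob m (Nat.le_of_lt hj) (by
        have := congrArg (List.take j) htake
        simpa [List.take_take, List.take_replicate] using this)
      rw [hres]
      have hdrop : bob.drop j = 0 :: bob.drop (j + 1) := by
        rw [List.drop_eq_getElem_cons hj, hbj]
      rw [hdrop, Prod.mk.injEq]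
      constructor
      · simp
      · simp [List.sum_append]

-- ===== VERDICT (by name: the statement is the Claim_ definition above) =====
theorem maximumBobPoints_spec : Claim_equal_maximumBobPoints := by
  intro m a _ _
  show maximumBobPoints m a = maximumBobPoints_alt m a
  simp only [maximumBobPoints, maximumBobPoints_alt]
  have h := loopA_eq a a.length (List.replicate a.length 0) m (by simp) (by simp)
  rw [h]
  simp [List.drop_replicate]
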